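-- pv_equiv track=rewrite | github.com/5-algorithms/minji | week7/5.py | solution
-- ===== SOURCE A (Python) =====
-- def solution(blocks):
--     f1, f2 = 0, 0
--     answer = 0
--     n = len(blocks)
--
--     while f1 < n and f2 < n:
--         count = 0
--         block = blocks[f1]
--         for i in range(f1-1, -1, -1):
--             if blocks[i] >= block:
--                 count += 1
--                 block = blocks[i]
--             else:
--                 break
--         block = blocks[f2]
--         for i in range(f2, n):
--             if blocks[i] >= block:
--                 count += 1
--                 block = blocks[i]
--                 if i == n-1:
--                     f1, f2 = n, n
--             else:
--                 f1, f2 = i, i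
--                 break
--         answer = max(answer, count)
--
--     return answer
-- ===== SOURCE B (Python) =====
-- def solution(blocks):
--     # O(n) valley DP: up[i] = length of non-decreasing run starting at i,
--     # stream the non-increasing run length ending at i and take the best sum.
--     n = len(blocks)
--     up = [1] * n
--     for i in range(n - 2, -1, -1):
--         if blocks[i] <= blocks[i + 1]:
--             up[i] = up[i + 1] + 1
--     best = 0
--     down = 0
--     for i in range(n):
--         down = down + 1 if i > 0 and blocks[i - 1] >= blocks[i] else 1
--         best = max(best, down + up[i] - 1)
--     return best
-- ===== Notes on version B (the rewrite author's own statement) =====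
-- stated objective: faster
-- what changed: Replaced A's restart-and-rescan while loop (which re-walks the non-increasing run to the left of every valley bottom) with a linear two-run DP: one right-to-left pass fills up[i] (non-decreasing run length starting at i), one left-to-right pass streams the non-increasing run length and maximises down+up-1.
import Mathlib
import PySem

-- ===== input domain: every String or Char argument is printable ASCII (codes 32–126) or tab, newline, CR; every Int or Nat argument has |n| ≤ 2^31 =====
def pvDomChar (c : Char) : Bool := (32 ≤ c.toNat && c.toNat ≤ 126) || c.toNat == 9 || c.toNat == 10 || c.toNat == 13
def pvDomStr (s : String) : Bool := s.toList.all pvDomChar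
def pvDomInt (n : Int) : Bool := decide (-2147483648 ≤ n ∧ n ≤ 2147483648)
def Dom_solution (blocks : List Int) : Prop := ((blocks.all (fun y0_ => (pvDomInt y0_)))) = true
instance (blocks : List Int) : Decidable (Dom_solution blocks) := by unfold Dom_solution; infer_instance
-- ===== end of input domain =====

-- B replaces A's quadratic restart-scan with a linear two-run DP (up-run array + streamed down-run); faster asymptotically on adversarial (descending) inputs.

-- ===== PORT A =====
-- left for-loop: for i in range(f1-1,-1,-1), state (block, count); called with fuel = f1
def leftScan (blocks : List Int) : Nat → Int → Int → Int
  | 0, _, count => count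
  | i + 1, block, count =>
      let b := blocks.getD i 0
      if block ≤ b then leftScan blocks i b (count + 1) else count

-- right for-loop: for i in range(f2, n); fuel = n - i (exact trip count); returns (count, next f1=f2)
def rightScan (blocks : List Int) : Nat → Nat → Int → Int → Int × Nat
  | 0, _, _, count => (count, blocks.length)
  | fuel + 1, i, block, count =>
      let b := blocks.getD i 0
      if block ≤ b then
        if i = blocks.length - 1 then (count + 1, blocks.length)
        else rightScan blocks fuel (i + 1) b (count + 1)
      else (count, i)

def mainLoop (blocks : List Int) : Nat → Nat → Int → Int
  | 0, _, answer => answer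
  | fuel + 1, f, answer =>
      if f < blocks.length then
        mainLoop blocks fuel
          (rightScan blocks (blocks.length - f) f (blocks.getD f 0)
            (leftScan blocks f (blocks.getD f 0) 0)).2
          (max answer
            (rightScan blocks (blocks.length - f) f (blocks.getD f 0)
              (leftScan blocks f (blocks.getD f 0) 0)).1)
      else answer

def solution (blocks : List Int) : Int := mainLoop blocks blocks.length 0 0

-- ===== PORT B =====
-- up = [1]*n; for i in range(n-2,-1,-1): up[i] = up[i+1]+1 if blocks[i] <= blocks[i+1]
-- built right-to-left; fuel k = number of trailing positions already filled, i = n-(k+1)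
def upList (blocks : List Int) (n : Nat) : Nat → List Int
  | 0 => []
  | k + 1 =>
      let i := n - (k + 1)
      let rest := upList blocks n k
      (if i + 1 < n ∧ blocks.getD i 0 ≤ blocks.getD (i + 1) 0 then rest.headD 1 + 1 else 1) :: rest

-- for i in range(n): down = down+1 if i>0 and blocks[i-1]>=blocks[i] else 1; best = max(best, down+up[i]-1)
-- for i in range(n): down = down+1 if i>0 and blocks[i-1]>=blocks[i] else 1; best = max(best, down+up[i]-1)
-- fuel = n - i, the exact number of remaining iterations
def fwdLoop (blocks up : List Int) : Nat → Nat → Int → Int → Int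
  | 0, _, _, best => best
  | fuel + 1, i, down, best =>
      let down' := if 0 < i ∧ blocks.getD i 0 ≤ blocks.getD (i - 1) 0 then down + 1 else 1
      fwdLoop blocks up fuel (i + 1) down' (max best (down' + up.getD i 0 - 1))

def solution_alt (blocks : List Int) : Int :=
  fwdLoop blocks (upList blocks blocks.length blocks.length) blocks.length 0 0 0

-- ===== PRECONDITION & SPEC =====
def Spec_solution (blocks : List Int) (out : Int) : Prop := out = solution_alt blocks
instance (blocks : List Int) (out : Int) : Decidable (Spec_solution blocks out) := by unfold Spec_solution; infer_instance

-- ===== CLAIM (what is proved, stated in full; the proofs are below) =====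
def Claim_equal_solution : Prop := ∀ (blocks : List Int), Dom_solution blocks → Spec_solution blocks (solution blocks)

-- ===== LEMMAS AND PROOFS =====

-- length of the maximal non-increasing run ending at i
def dval (blocks : List Int) : Nat → Nat
  | 0 => 1
  | i + 1 => if blocks.getD (i + 1) 0 ≤ blocks.getD i 0 then dval blocks i + 1 else 1

-- length of the maximal non-decreasing run starting at i
def uval (blocks : List Int) (i : Nat) : Nat :=
  if _h : i + 1 < blocks.length ∧ blocks.getD i 0 ≤ blocks.getD (i + 1) 0 then
    uval blocks (i + 1) + 1
  else 1
termination_by blocks.length - i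
decreasing_by omega

-- the valley value at position i
def val (blocks : List Int) (i : Nat) : Int := (dval blocks i : Int) + (uval blocks i : Int) - 1

-- max of val over [f, blocks.length)
def maxFrom (blocks : List Int) (f : Nat) : Int :=
  if _h : f < blocks.length then max (val blocks f) (maxFrom blocks (f + 1)) else 0
termination_by blocks.length - f

theorem dval_pos (blocks : List Int) (i : Nat) : 1 ≤ dval blocks i := by
  cases i <;> simp only [dval] <;> first | omega | (split <;> omega)

theorem uval_pos (blocks : List Int) (i : Nat) : 1 ≤ uval blocks i := by
  rw [uval]; split <;> omega

theorem dval_succ_le (blocks : List Int) (i : Nat) :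
    dval blocks (i + 1) ≤ dval blocks i + 1 := by
  have := dval_pos blocks i
  simp only [dval]; split <;> omega

theorem uval_le (blocks : List Int) (i : Nat) (hi : i < blocks.length) :
    i + uval blocks i ≤ blocks.length := by
  induction hk : blocks.length - i using Nat.strong_induction_on generalizing i with
  | _ k ih =>
    rw [uval]
    split
    · rename_i h
      have := ih (blocks.length - (i+1)) (by omega) (i+1) h.1 rfl
      omega
    · omega

theorem leftScan_eq (blocks : List Int) : ∀ i c,
    leftScan blocks i (blocks.getD i 0) c = c + (dval blocks i : Int) - 1 := by
  intro i
  induction i with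
  | zero => intro c; simp [leftScan, dval]
  | succ i ih =>
    intro c
    have hp := dval_pos blocks i
    simp only [leftScan, dval]
    by_cases h : blocks.getD (i + 1) 0 ≤ blocks.getD i 0
    · rw [if_pos h, if_pos h, ih]; push_cast; ring
    · rw [if_neg h, if_neg h]; push_cast; ring

theorem rightScan_eq (blocks : List Int) : ∀ (fuel i : Nat) (b c : Int),
    blocks.length - i = fuel → i < blocks.length → b ≤ blocks.getD i 0 →
    rightScan blocks fuel i b c = (c + (uval blocks i : Int), i + uval blocks i) := by
  intro fuel
  induction fuel with
  | zero => intro i b c hf hi hb; omega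
  | succ fuel ih =>
    intro i b c hf hi hb
    simp only [rightScan, if_pos hb]
    by_cases hlast : i = blocks.length - 1
    · have h1 : ¬ (i + 1 < blocks.length ∧ blocks.getD i 0 ≤ blocks.getD (i + 1) 0) := by
        intro h; omega
      rw [if_pos hlast]
      conv_rhs => rw [uval, dif_neg h1]
      simp only [Prod.mk.injEq]
      refine ⟨?_, ?_⟩ <;> first | trivial | omega
    · rw [if_neg hlast]
      have h1 : i + 1 < blocks.length := by omega
      by_cases h2 : blocks.getD i 0 ≤ blocks.getD (i + 1) 0
      · rw [ih (i + 1) _ _ (by omega) h1 h2]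
        conv_rhs => rw [uval, dif_pos ⟨h1, h2⟩]
        simp only [Prod.mk.injEq]
        refine ⟨?_, ?_⟩ <;> first | trivial | omega
      · cases fuel with
        | zero => omega
        | succ fuel' =>
          simp only [rightScan, if_neg h2]
          conv_rhs => rw [uval, dif_neg (fun h => h2 h.2)]
          simp only [Prod.mk.injEq]
          refine ⟨?_, ?_⟩ <;> first | trivial | omega

theorem run_dom (blocks : List Int) (f : Nat) : ∀ k, f + k < f + uval blocks f →
    val blocks (f + k) ≤ val blocks f ∧
      (f + k) + uval blocks (f + k) = f + uval blocks f := by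
  intro k
  induction k with
  | zero => intro _; exact ⟨le_rfl, rfl⟩
  | succ k ih =>
    intro hk
    show val blocks (f + k + 1) ≤ val blocks f ∧
      (f + k + 1) + uval blocks (f + k + 1) = f + uval blocks f
    have huv := uval_pos blocks (f + k)
    obtain ⟨hv, he⟩ := ih (by omega)
    by_cases hc : (f + k) + 1 < blocks.length ∧
        blocks.getD (f + k) 0 ≤ blocks.getD ((f + k) + 1) 0
    · have hu : uval blocks (f + k) = uval blocks (f + k + 1) + 1 := by
        rw [uval, dif_pos hc]
      refine ⟨?_, by omega⟩
      have hd : dval blocks (f + k + 1) ≤ dval blocks (f + k) + 1 := dval_succ_le blocks (f + k)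
      have : val blocks (f + k + 1) ≤ val blocks (f + k) := by
        unfold val; omega
      omega
    · have : uval blocks (f + k) = 1 := by rw [uval, dif_neg hc]
      omega

theorem maxFrom_peel (blocks : List Int) (V : Int) : ∀ m f, f ≤ m →
    (∀ j, f ≤ j → j < m → val blocks j ≤ V) →
    max V (maxFrom blocks f) = max V (maxFrom blocks m) := by
  intro m f
  induction hk : m - f using Nat.strong_induction_on generalizing f with
  | _ k ih =>
    intro hfm hdom
    by_cases heq : f = m
    · rw [heq]
    · have hlt : f < m := by omega
      by_cases hf : f < blocks.length
      · have h1 : maxFrom blocks f = max (val blocks f) (maxFrom blocks (f + 1)) := by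
          rw [maxFrom, dif_pos hf]
        have hVf : val blocks f ≤ V := hdom f le_rfl hlt
        have h2 := ih (m - (f+1)) (by omega) (f+1) rfl (by omega)
              (fun j hj1 hj2 => hdom j (by omega) hj2)
        omega
      · have h0 : maxFrom blocks f = 0 := by rw [maxFrom, dif_neg hf]
        have h0' : maxFrom blocks m = 0 := by
          rw [maxFrom, dif_neg (by omega)]
        rw [h0, h0']

theorem mainLoop_eq (blocks : List Int) : ∀ (fuel f : Nat) (a : Int),
    blocks.length - f ≤ fuel → 0 ≤ a →
    mainLoop blocks fuel f a = max a (maxFrom blocks f) := by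
  intro fuel
  induction fuel with
  | zero =>
    intro f a hf ha
    have hnf : ¬ f < blocks.length := by omega
    rw [mainLoop, maxFrom, dif_neg hnf]
    omega
  | succ fuel ih =>
    intro f a hf ha
    by_cases hfl : f < blocks.length
    · rw [mainLoop, if_pos hfl]
      rw [leftScan_eq blocks f 0,
          rightScan_eq blocks (blocks.length - f) f (blocks.getD f 0) _ rfl hfl le_rfl]
      have hu := uval_pos blocks f
      have hle := uval_le blocks f hfl
      have hv : (0 + (dval blocks f : Int) - 1) + (uval blocks f : Int) = val blocks f := by
        unfold val; ring
      rw [hv]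
      rw [ih (f + uval blocks f) _ (by omega)
            (by have := dval_pos blocks f; unfold val at *; positivity)]
      have hpeel := maxFrom_peel blocks (val blocks f) (f + uval blocks f) f (by omega)
        (by intro j h1 h2
            have := (run_dom blocks f (j - f) (by omega)).1
            have hj : f + (j - f) = j := by omega
            rwa [hj] at this)
      have hmf : maxFrom blocks f = max (val blocks f) (maxFrom blocks (f + 1)) := by
        rw [maxFrom, dif_pos hfl]
      omega
    · rw [mainLoop, if_neg hfl, maxFrom, dif_neg hfl]
      omega

theorem upList_eq (blocks : List Int) : ∀ k, k ≤ blocks.length →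
    upList blocks blocks.length k =
      (List.range k).map
        (fun t => ((uval blocks (blocks.length - k + t) : Nat) : Int)) := by
  intro k
  induction k with
  | zero => intro _; simp [upList]
  | succ k ih =>
    intro hk
    rw [upList, ih (by omega), List.range_succ_eq_map]
    simp only [List.map_cons, List.map_map]
    congr 1
    · -- head value = uval (n - (k+1))
      by_cases hk0 : k = 0
      · subst hk0
        have h1 : ¬ (blocks.length - 1 + 1 < blocks.length ∧
            blocks.getD (blocks.length - 1) 0 ≤ blocks.getD (blocks.length - 1 + 1) 0) := by
          intro h; omega
        have h2 : ¬ (blocks.length - 1 + 1 < blocks.length) := by omega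
        simp only [Nat.add_zero]
        rw [if_neg (by intro h; exact h2 h.1)]
        rw [uval, dif_neg h1]
        norm_num
      · have hkk : 1 ≤ k := by omega
        have hi1 : blocks.length - (k + 1) + 1 = blocks.length - k := by omega
        have hlt : blocks.length - (k + 1) + 1 < blocks.length := by omega
        have hhead : (List.map (fun t => ((uval blocks (blocks.length - k + t) : Nat) : Int))
            (List.range k)).headD 1
            = ((uval blocks (blocks.length - (k + 1) + 1) : Nat) : Int) := by
          rw [hi1]
          cases hr : List.range k with
          | nil =>
            exfalso
            have := congrArg List.length hr
            simp at this; omega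
          | cons x xs =>
            have hx : x = 0 := by
              have h0 : (List.range k).head? = some 0 := by
                cases k with
                | zero => omega
                | succ k' => rw [List.range_succ_eq_map]; rfl
              rw [hr] at h0; simp at h0; omega
            simp [hx]
        simp only [Nat.add_zero]
        by_cases hc : blocks.getD (blocks.length - (k + 1)) 0 ≤
            blocks.getD (blocks.length - (k + 1) + 1) 0
        · rw [if_pos ⟨hlt, hc⟩, hhead]
          conv_rhs => rw [uval, dif_pos ⟨hlt, hc⟩]
          push_cast; ring
        · rw [if_neg (fun h => hc h.2)]
          conv_rhs => rw [uval, dif_neg (fun h => hc h.2)]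
          norm_num
    · apply List.map_congr_left
      intro t _
      have : blocks.length - (k + 1) + (t + 1) = blocks.length - k + t := by omega
      simp [Function.comp, this]

theorem upList_getD (blocks : List Int) (i : Nat) (hi : i < blocks.length) :
    (upList blocks blocks.length blocks.length).getD i 0 = (uval blocks i : Int) := by
  rw [upList_eq blocks blocks.length le_rfl]
  simp [List.getD, hi]

theorem fwdLoop_eq (blocks : List Int) : ∀ (fuel i : Nat) (down best : Int),
    blocks.length - i = fuel → 0 ≤ best →
    (i = 0 ∨ down = (dval blocks (i - 1) : Int)) →
    fwdLoop blocks (upList blocks blocks.length blocks.length) fuel i down best =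
      max best (maxFrom blocks i) := by
  intro fuel
  induction fuel with
  | zero =>
    intro i down best hf hb _
    have hnf : ¬ i < blocks.length := by omega
    rw [fwdLoop, maxFrom, dif_neg hnf]
    omega
  | succ fuel ih =>
    intro i down best hf hb hinv
    have hfl : i < blocks.length := by omega
    rw [fwdLoop]
    have hd : (if 0 < i ∧ blocks.getD i 0 ≤ blocks.getD (i - 1) 0 then down + 1 else 1)
        = (dval blocks i : Int) := by
      cases i with
      | zero => simp [dval]
      | succ j =>
        have hdj : down = (dval blocks j : Int) := by
          rcases hinv with h | h
          · omega
          · simpa using h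
        simp only [dval]
        by_cases hc : blocks.getD (j + 1) 0 ≤ blocks.getD j 0
        · rw [if_pos ⟨by omega, by simpa using hc⟩, if_pos hc, hdj]; push_cast; ring
        · rw [if_neg (by intro h; exact hc (by simpa using h.2)), if_neg hc]; simp
    simp only [hd, upList_getD blocks i hfl]
    have hv : (dval blocks i : Int) + (uval blocks i : Int) - 1 = val blocks i := rfl
    rw [hv]
    rw [ih (i + 1) (dval blocks i) (max best (val blocks i)) (by omega)
          (by have := dval_pos blocks i; have := uval_pos blocks i; unfold val at *; positivity)
          (Or.inr (by simp))]
    have hmf : maxFrom blocks i = max (val blocks i) (maxFrom blocks (i + 1)) := by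
      rw [maxFrom, dif_pos hfl]
    omega

-- ===== VERDICT (by name: the statement is the Claim_ definition above) =====
theorem solution_spec : Claim_equal_solution := by
  intro blocks _
  unfold Spec_solution solution solution_alt
  rw [mainLoop_eq blocks blocks.length 0 0 (by omega) le_rfl,
      fwdLoop_eq blocks blocks.length 0 0 0 (by omega) le_rfl (Or.inl rfl)]
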